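-- pv_equiv track=rewrite | github.com/alkrab112-web/-Neon-Trader-v7-neu-main | -Neon-Trader-v7-neu-main/backend/models/vault.py | validate_key_strength
-- ===== SOURCE A (Python) =====
-- from typing import Optional, Dict, Any
--
-- def validate_key_strength(key: str) -> Dict[str, bool]:
--     """Validate key strength and security"""
--     return {
--         "min_length": len(key) >= 32,
--         "has_special_chars": any(c in key for c in "!@#$%^&*()_+-=[]{}|;:,.<>?"),
--         "has_numbers": any(c.isdigit() for c in key),
--         "has_letters": any(c.isalpha() for c in key),
--         "is_base64": key.replace("-", "+").replace("_", "/").isalnum() or "=" in key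
--     }
-- ===== SOURCE B (Python) =====
-- SPECIALS = frozenset("!@#$%^&*()_+-=[]{}|;:,.<>?")
--
-- def validate_key_strength(key: str) -> dict:
--     """Validate key strength: one pass over the characters instead of several scans."""
--     n = 0
--     has_special = has_digit = has_letter = has_eq = False
--     all_alnum = True
--     for c in key:
--         n += 1
--         if c in SPECIALS:
--             has_special = True
--         if c.isdigit():
--             has_digit = True
--         if c.isalpha():
--             has_letter = True
--         if c == "=":
--             has_eq = True
--         if not c.isalnum():
--             all_alnum = False
--     return {
--         "min_length": n >= 32,
--         "has_special_chars": has_special,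
--         "has_numbers": has_digit,
--         "has_letters": has_letter,
--         "is_base64": (n > 0 and all_alnum) or has_eq,
--     }
-- ===== Notes on version B (the rewrite author's own statement) =====
-- stated objective: alternative
-- what changed: B makes a single explicit pass over the key, accumulating the length and the special/digit/letter/equals-sign/all-alphanumeric flags, instead of A's five separate scans (three any() generators, a substring test and a double replace + isalnum pass); the replace calls are dropped because both replaced characters and both replacement characters are non-alphanumeric, so they cannot change the isalnum result.
import Mathlib
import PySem

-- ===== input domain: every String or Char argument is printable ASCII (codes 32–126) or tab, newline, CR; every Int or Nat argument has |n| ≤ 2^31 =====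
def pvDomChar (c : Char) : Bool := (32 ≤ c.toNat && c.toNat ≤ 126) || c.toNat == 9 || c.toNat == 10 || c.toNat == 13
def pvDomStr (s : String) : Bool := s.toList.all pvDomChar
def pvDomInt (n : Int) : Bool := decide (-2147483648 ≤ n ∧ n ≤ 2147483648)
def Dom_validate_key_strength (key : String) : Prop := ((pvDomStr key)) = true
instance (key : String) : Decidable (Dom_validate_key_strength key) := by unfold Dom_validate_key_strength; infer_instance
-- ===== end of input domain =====

-- B replaces A's five independent scans of the key by one fold accumulating all flags; same output, same O(n) cost.

-- ===== PORT A =====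
def pvSpecials : List Char := "!@#$%^&*()_+-=[]{}|;:,.<>?".toList

def validate_key_strength (key : String) : List (String × Bool) :=
  [ ("min_length", decide (PySem.Str.len key ≥ 32)),
    ("has_special_chars", pvSpecials.any (fun c => PySem.Chars.isIn [c] key.toList)),
    ("has_numbers", key.toList.any (fun c => PySem.Chars.isdigit c)),
    ("has_letters", key.toList.any (fun c => PySem.Chars.isalpha c)),
    ("is_base64",
      PySem.Chars.strIsalnum (PySem.Chars.replace (PySem.Chars.replace key.toList ['-'] ['+']) ['_'] ['/'])
        || PySem.Chars.isIn ['='] key.toList) ]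

-- ===== PORT B =====
def pvSpecialSet : PySem.Set Char := PySem.Set.ofList "!@#$%^&*()_+-=[]{}|;:,.<>?".toList

-- state: (n, has_special, has_digit, has_letter, has_eq, all_alnum)
def pvScanStep (st : Int × Bool × Bool × Bool × Bool × Bool) (c : Char) :
    Int × Bool × Bool × Bool × Bool × Bool :=
  (st.1 + 1,
   st.2.1 || decide (c ∈ pvSpecialSet),
   st.2.2.1 || PySem.Chars.isdigit c,
   st.2.2.2.1 || PySem.Chars.isalpha c,
   st.2.2.2.2.1 || (c == '='),
   st.2.2.2.2.2 && PySem.Chars.isalnum c)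

def validate_key_strength_alt (key : String) : List (String × Bool) :=
  let st := key.toList.foldl pvScanStep ((0 : Int), false, false, false, false, true)
  [ ("min_length", decide (st.1 ≥ 32)),
    ("has_special_chars", st.2.1),
    ("has_numbers", st.2.2.1),
    ("has_letters", st.2.2.2.1),
    ("is_base64", (decide (st.1 > 0) && st.2.2.2.2.2) || st.2.2.2.2.1) ]

-- ===== PRECONDITION & SPEC =====
def Spec_validate_key_strength (key : String) (out : List (String × Bool)) : Prop := out = validate_key_strength_alt key
instance (key : String) (out : List (String × Bool)) : Decidable (Spec_validate_key_strength key out) := by unfold Spec_validate_key_strength; infer_instance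

-- ===== CLAIM (what is proved, stated in full; the proofs are below) =====
def Claim_equal_validate_key_strength : Prop := ∀ (key : String), Dom_validate_key_strength key → Spec_validate_key_strength key (validate_key_strength key)

-- ===== LEMMAS AND PROOFS =====

lemma pv_singleton_infix (c : Char) (s : List Char) : [c] <:+: s ↔ c ∈ s := by
  constructor
  · intro h; exact h.subset (List.mem_singleton_self c)
  · intro h
    obtain ⟨l, r, rfl⟩ := List.append_of_mem h
    exact ⟨l, r, by simp⟩

lemma pv_scan_inv (l : List Char) (st : Int × Bool × Bool × Bool × Bool × Bool) :
    l.foldl pvScanStep st =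
      (st.1 + l.length,
       st.2.1 || l.any (fun c => decide (c ∈ pvSpecialSet)),
       st.2.2.1 || l.any (fun c => PySem.Chars.isdigit c),
       st.2.2.2.1 || l.any (fun c => PySem.Chars.isalpha c),
       st.2.2.2.2.1 || l.any (fun c => c == '='),
       st.2.2.2.2.2 && l.all (fun c => PySem.Chars.isalnum c)) := by
  induction l generalizing st with
  | nil => simp
  | cons c t ih =>
    simp only [List.foldl_cons, ih, pvScanStep, List.any_cons, List.all_cons,
      List.length_cons, Bool.or_assoc, Bool.and_assoc, Prod.mk.injEq]
    refine ⟨by push_cast; ring, ?_⟩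
    simp

lemma pv_replace_go_single (a b : Char) :
    ∀ (fuel : Nat) (l acc : List Char), l.length ≤ fuel →
      PySem.Chars.replace.go [a] [b] fuel l acc =
        acc.reverse ++ l.map (fun c => if c = a then b else c) := by
  intro fuel
  induction fuel with
  | zero =>
    intro l acc h
    have : l = [] := List.eq_nil_of_length_eq_zero (Nat.le_zero.mp h)
    subst this
    simp [PySem.Chars.replace.go]
  | succ n ih =>
    intro l acc h
    cases l with
    | nil => simp [PySem.Chars.replace.go]
    | cons c t =>
      rw [PySem.Chars.replace.go]
      by_cases hc : c = a
      · subst hc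
        have hpre : [c].isPrefixOf (c :: t) = true := by simp [List.isPrefixOf]
        simp only [hpre, if_true, List.length_singleton, List.drop_one, List.tail_cons]
        rw [ih t _ (by simpa using Nat.lt_succ_iff.mp (Nat.lt_of_lt_of_le (by simp) h))]
        simp
      · have hpre : [a].isPrefixOf (c :: t) = false := by
          simp [List.isPrefixOf]
          intro h'; exact absurd h'.symm hc
        simp only [hpre, Bool.false_eq_true, if_false]
        rw [ih t _ (by simpa using Nat.succ_le_succ_iff.mp h)]
        simp [hc]

lemma pv_replace_single (s : List Char) (a b : Char) :
    PySem.Chars.replace s [a] [b] = s.map (fun c => if c = a then b else c) := by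
  rw [PySem.Chars.replace]
  simp [pv_replace_go_single a b s.length s [] le_rfl]

lemma pv_isalnum_subst (c : Char) :
    PySem.Chars.isalnum (if (if c = '-' then '+' else c) = '_' then '/'
      else (if c = '-' then '+' else c)) = PySem.Chars.isalnum c := by
  by_cases h1 : c = '-'
  · subst h1; decide
  · by_cases h2 : c = '_'
    · subst h2; decide
    · simp [h1, h2]

lemma pv_all_congr {l : List Char} {p q : Char → Bool} (h : ∀ c, p c = q c) :
    l.all p = l.all q := by
  induction l with
  | nil => rfl
  | cons c t ih => simp [List.all_cons, h c, ih]

-- ===== VERDICT (by name: the statement is the Claim_ definition above) =====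
set_option maxHeartbeats 1000000 in
theorem validate_key_strength_spec : Claim_equal_validate_key_strength := by
  intro key _
  unfold Spec_validate_key_strength validate_key_strength validate_key_strength_alt
  rw [pv_scan_inv]
  simp only [Bool.false_or, Bool.true_and, List.cons.injEq, Prod.mk.injEq,
    and_true, true_and]
  refine ⟨?_, ?_, ?_⟩
  · -- min_length
    simp [PySem.Str.len_eq]
  · -- has_special_chars
    rw [Bool.eq_iff_iff]
    simp only [List.any_eq_true, PySem.Chars.isIn_iff_infix, pv_singleton_infix,
      decide_eq_true_eq, pvSpecialSet, PySem.Set.mem_ofList]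
    constructor
    · rintro ⟨c, hc, hk⟩; exact ⟨c, hk, hc⟩
    · rintro ⟨c, hk, hc⟩; exact ⟨c, hc, hk⟩
  · -- is_base64
    have hEq : PySem.Chars.isIn ['='] key.toList = key.toList.any (fun c => c == '=') := by
      rw [Bool.eq_iff_iff]
      simp only [List.any_eq_true, PySem.Chars.isIn_iff_infix, pv_singleton_infix, beq_iff_eq]
      constructor
      · intro h; exact ⟨'=', h, rfl⟩
      · rintro ⟨c, hk, rfl⟩; exact hk
    have hAl : PySem.Chars.strIsalnum
        (PySem.Chars.replace (PySem.Chars.replace key.toList ['-'] ['+']) ['_'] ['/']) =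
        (decide ((0 : Int) + (key.toList.length : Int) > 0)
          && key.toList.all (fun c => PySem.Chars.isalnum c)) := by
      rw [pv_replace_single, pv_replace_single, List.map_map]
      simp only [PySem.Chars.strIsalnum]
      congr 1
      · cases key.toList <;> simp
      · rw [List.all_map]
        exact pv_all_congr (fun c => pv_isalnum_subst c)
    rw [hEq, hAl]
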